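-- pv_equiv track=rewrite | github.com/lundha/Active-Learning | utils/utils.py | map_list
-- ===== SOURCE A (Python) =====
-- def map_list(orig_array, masking):
--     masked_array = [_ for _ in range(len(orig_array))]
--     for i in range(len(orig_array)):
--         if i in masking:
--             masked_array[i] = True
--         else:
--             masked_array[i] = False
--     return masked_array
-- ===== SOURCE B (Python) =====
-- def map_list(orig_array, masking):
--     masked_array = [False] * len(orig_array)
--     for m in masking:
--         if 0 <= m < len(orig_array):
--             masked_array[m] = True
--     return masked_array
-- ===== Notes on version B (the rewrite author's own statement) =====
-- stated objective: faster
-- what changed: Replaces the gather pass (for each index, a linear membership scan of masking) by a scatter pass: start from an all-False list and mark masked_array[m] = True for each in-range entry of masking.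
import Mathlib
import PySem

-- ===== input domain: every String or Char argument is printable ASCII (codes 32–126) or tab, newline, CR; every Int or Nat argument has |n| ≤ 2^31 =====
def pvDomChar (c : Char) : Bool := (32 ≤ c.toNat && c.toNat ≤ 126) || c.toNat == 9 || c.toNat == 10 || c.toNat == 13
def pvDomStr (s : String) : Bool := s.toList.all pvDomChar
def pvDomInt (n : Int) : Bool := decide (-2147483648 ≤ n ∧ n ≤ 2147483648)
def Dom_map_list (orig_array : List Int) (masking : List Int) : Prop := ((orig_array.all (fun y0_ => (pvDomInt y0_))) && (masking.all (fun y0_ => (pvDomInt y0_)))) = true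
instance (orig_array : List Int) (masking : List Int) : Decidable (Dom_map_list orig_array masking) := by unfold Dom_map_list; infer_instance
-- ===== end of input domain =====

-- ===== PORT A =====
-- B replaces A's per-index membership scan by a single scatter pass over `masking` (asymptotically faster).
def map_list (orig_array : List Int) (masking : List Int) : List Bool :=
  (List.range orig_array.length).map
    (fun i => if masking.contains (Int.ofNat i) then true else false)

-- ===== PORT B =====
def map_list_alt (orig_array : List Int) (masking : List Int) : List Bool :=
  masking.foldl
    (fun acc m =>
      if 0 ≤ m ∧ m < (orig_array.length : Int) then acc.set m.toNat true else acc)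
    (List.replicate orig_array.length false)

-- ===== PRECONDITION & SPEC =====
def Spec_map_list (orig_array : List Int) (masking : List Int) (out : List Bool) : Prop := out = map_list_alt orig_array masking
instance (orig_array : List Int) (masking : List Int) (out : List Bool) : Decidable (Spec_map_list orig_array masking out) := by unfold Spec_map_list; infer_instance

-- ===== CLAIM (what is proved, stated in full; the proofs are below) =====
def Claim_equal_map_list : Prop := ∀ (orig_array : List Int) (masking : List Int), Dom_map_list orig_array masking → Spec_map_list orig_array masking (map_list orig_array masking)

-- ===== LEMMAS AND PROOFS =====

def pvStep (n : Nat) (acc : List Bool) (m : Int) : List Bool :=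
  if 0 ≤ m ∧ m < (n : Int) then acc.set m.toNat true else acc

theorem pvStep_length (n : Nat) (acc : List Bool) (m : Int) :
    (pvStep n acc m).length = acc.length := by
  unfold pvStep; split <;> simp

theorem pv_foldl_length (ms : List Int) (n : Nat) (acc : List Bool) :
    (ms.foldl (pvStep n) acc).length = acc.length := by
  induction ms generalizing acc with
  | nil => rfl
  | cons m rest ih => simp [List.foldl, ih, pvStep_length]

theorem pv_foldl_get (ms : List Int) (n : Nat) (acc : List Bool)
    (hlen : acc.length = n) (i : Nat) (hi : i < n) :
    (ms.foldl (pvStep n) acc)[i]? = some (acc[i]'(hlen ▸ hi) || ms.contains (i : Int)) := by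
  induction ms generalizing acc with
  | nil => simp [List.getElem?_eq_getElem (hlen ▸ hi)]
  | cons m rest ih =>
    have hlen' : (pvStep n acc m).length = n := by rw [pvStep_length]; exact hlen
    rw [List.foldl_cons, ih _ hlen']
    congr 1
    by_cases hc : 0 ≤ m ∧ m < (n : Int)
    · by_cases hm : m = (i : Int)
      · subst hm
        simp [pvStep, hc]
      · have ht : m.toNat ≠ i := by omega
        have hm' : ¬((i : Int) = m) := fun h => hm h.symm
        simp [pvStep, hc, ht, hm']
    · have hm : ¬((i : Int) = m) := by omega
      simp [pvStep, hc, hm]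

-- ===== VERDICT (by name: the statement is the Claim_ definition above) =====
theorem map_list_spec : Claim_equal_map_list := by
  intro orig_array masking _
  unfold Spec_map_list map_list map_list_alt
  have halt : masking.foldl
      (fun acc m => if 0 ≤ m ∧ m < (orig_array.length : Int) then acc.set m.toNat true else acc)
      (List.replicate orig_array.length false)
      = masking.foldl (pvStep orig_array.length) (List.replicate orig_array.length false) := rfl
  rw [halt]
  apply List.ext_getElem?
  intro i
  by_cases hi : i < orig_array.length
  · rw [pv_foldl_get masking orig_array.length _ (by simp) i hi]
    simp only [List.getElem?_map, List.getElem?_range, hi, Option.map_some,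
      List.getElem_replicate, Bool.false_or]
    simp
  · rw [List.getElem?_eq_none (by simpa using hi),
        List.getElem?_eq_none (by rw [pv_foldl_length]; simpa using hi)]
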